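-- pv_equiv track=rewrite | github.com/OJOetw/AQISim | AQISim.py | simulate_pm25
-- ===== SOURCE A (Python) =====
-- def simulate_pm25(wind_speed_input, factory_emission_level_input,
--                   traffic_volume_input, raining_input,
--                   number_of_simulation_days_input):
--     pm25 = 50
--     record = []
--     for day in range(1, number_of_simulation_days_input + 1):
--         change = 0
--         #change是pm25的變化量
--
--         if wind_speed_input > 15:
--             change -= 10
--         elif wind_speed_input < 5:
--             change += 5
--
--         change += factory_emission_level_input * 2
--
--         if traffic_volume_input == "high":
--             change += 7
--         elif traffic_volume_input == "medium":
--             change += 4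
--         else:
--             change += 1
--
--         if raining_input:
--             change -= 8
--
--         pm25 = max(0, pm25 + change)
--               #確保低於0時，會顯示0不會顯示負數
--
--         record.append((day, pm25))
--
--     return record
-- ===== SOURCE B (Python) =====
-- def simulate_pm25(wind_speed_input, factory_emission_level_input,
--                   traffic_volume_input, raining_input,
--                   number_of_simulation_days_input):
--     # per-day change is constant; compute it once
--     if wind_speed_input > 15:
--         change = -10
--     elif wind_speed_input < 5:
--         change = 5
--     else:
--         change = 0
--     change += factory_emission_level_input * 2
--     if traffic_volume_input == "high":
--         change += 7
--     elif traffic_volume_input == "medium":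
--         change += 4
--     else:
--         change += 1
--     if raining_input:
--         change -= 8
--     # closed form: once clamped to 0 the value stays 0 (only possible when
--     # change < 0), so each day's value is max(0, 50 + day*change) independently
--     return [(day, max(0, 50 + day * change))
--             for day in range(1, number_of_simulation_days_input + 1)]
-- ===== Notes on version B (the rewrite author's own statement) =====
-- stated objective: simpler
-- what changed: B drops the running pm25 accumulator entirely: it computes the constant per-day change once and emits each day's value independently from the clamped linear closed form max(0, 50 + day*change).
import Mathlib
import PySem

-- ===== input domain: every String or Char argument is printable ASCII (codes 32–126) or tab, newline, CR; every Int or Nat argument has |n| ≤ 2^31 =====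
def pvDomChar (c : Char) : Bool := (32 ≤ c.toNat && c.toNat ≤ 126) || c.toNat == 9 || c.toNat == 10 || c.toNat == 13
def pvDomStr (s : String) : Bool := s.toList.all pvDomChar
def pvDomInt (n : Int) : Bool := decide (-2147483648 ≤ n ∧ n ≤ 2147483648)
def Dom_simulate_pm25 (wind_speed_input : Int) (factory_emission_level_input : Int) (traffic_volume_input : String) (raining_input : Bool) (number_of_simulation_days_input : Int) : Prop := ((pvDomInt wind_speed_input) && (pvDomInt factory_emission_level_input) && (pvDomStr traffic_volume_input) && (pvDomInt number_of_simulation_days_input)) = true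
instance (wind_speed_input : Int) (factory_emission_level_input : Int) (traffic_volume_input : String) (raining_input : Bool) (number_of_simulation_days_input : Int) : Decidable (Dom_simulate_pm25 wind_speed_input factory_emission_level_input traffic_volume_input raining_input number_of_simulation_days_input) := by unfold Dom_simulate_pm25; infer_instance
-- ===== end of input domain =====

-- B replaces A's running pm25 accumulator with a stateless per-day closed form
-- max(0, 50 + day*change), computing the constant change once (objective: simpler).

-- ===== PORT A =====
def simulate_pm25 (wind_speed_input : Int) (factory_emission_level_input : Int) (traffic_volume_input : String) (raining_input : Bool) (number_of_simulation_days_input : Int) : List (Int × Int) :=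
  let init : Int × List (Int × Int) := (50, [])   -- (pm25, record)
  let st :=
    (PySem.List.pyRange 1 (number_of_simulation_days_input + 1) 1).foldl
      (fun (st : Int × List (Int × Int)) (day : Int) =>
        let pm25 := st.1
        let change : Int := 0
        let change := if wind_speed_input > 15 then change - 10
                      else if wind_speed_input < 5 then change + 5
                      else change
        let change := change + factory_emission_level_input * 2
        let change := if traffic_volume_input == "high" then change + 7
                      else if traffic_volume_input == "medium" then change + 4
                      else change + 1
        let change := if raining_input then change - 8 else change
        let pm25 := max 0 (pm25 + change)
        (pm25, st.2 ++ [(day, pm25)]))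
      init
  st.2

-- ===== PORT B =====
def simulate_pm25_alt (wind_speed_input : Int) (factory_emission_level_input : Int) (traffic_volume_input : String) (raining_input : Bool) (number_of_simulation_days_input : Int) : List (Int × Int) :=
  let change : Int :=
    (if wind_speed_input > 15 then (-10 : Int)
     else if wind_speed_input < 5 then 5 else 0)
    + factory_emission_level_input * 2
    + (if traffic_volume_input == "high" then (7 : Int)
       else if traffic_volume_input == "medium" then 4 else 1)
    + (if raining_input then (-8 : Int) else 0)
  (PySem.List.pyRange 1 (number_of_simulation_days_input + 1) 1).map
    (fun day => (day, max 0 (50 + day * change)))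

-- ===== PRECONDITION & SPEC =====
def Spec_simulate_pm25 (wind_speed_input : Int) (factory_emission_level_input : Int) (traffic_volume_input : String) (raining_input : Bool) (number_of_simulation_days_input : Int) (out : List (Int × Int)) : Prop := out = simulate_pm25_alt wind_speed_input factory_emission_level_input traffic_volume_input raining_input number_of_simulation_days_input
instance (wind_speed_input : Int) (factory_emission_level_input : Int) (traffic_volume_input : String) (raining_input : Bool) (number_of_simulation_days_input : Int) (out : List (Int × Int)) : Decidable (Spec_simulate_pm25 wind_speed_input factory_emission_level_input traffic_volume_input raining_input number_of_simulation_days_input out) := by unfold Spec_simulate_pm25; infer_instance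

-- ===== CLAIM (what is proved, stated in full; the proofs are below) =====
def Claim_equal_simulate_pm25 : Prop := ∀ (wind_speed_input : Int) (factory_emission_level_input : Int) (traffic_volume_input : String) (raining_input : Bool) (number_of_simulation_days_input : Int), Dom_simulate_pm25 wind_speed_input factory_emission_level_input traffic_volume_input raining_input number_of_simulation_days_input → Spec_simulate_pm25 wind_speed_input factory_emission_level_input traffic_volume_input raining_input number_of_simulation_days_input (simulate_pm25 wind_speed_input factory_emission_level_input traffic_volume_input raining_input number_of_simulation_days_input)

-- ===== LEMMAS AND PROOFS =====

-- the clamp commutes with adding c once we know c ≥ 0 forces x ≥ 0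
theorem pv_clamp_step (x c : Int) (h : 0 ≤ c → 0 ≤ x) :
    max 0 (max 0 x + c) = max 0 (x + c) := by omega

-- A's loop with a constant per-day change c computes the closed form pointwise
theorem pv_loop_closed (c : Int) (k : Nat) :
    (PySem.List.pyRange 1 ((k : Int) + 1) 1).foldl
      (fun (st : Int × List (Int × Int)) (day : Int) =>
        (max 0 (st.1 + c), st.2 ++ [(day, max 0 (st.1 + c))]))
      (50, [])
    = (max 0 (50 + (k : Int) * c),
       (PySem.List.pyRange 1 ((k : Int) + 1) 1).map
         (fun day => (day, max 0 (50 + day * c)))) := by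
  induction k with
  | zero => simp [PySem.List.pyRange_one_eq_nil (by omega : (1:Int) ≤ 1)]
  | succ k ih =>
      have hb : (1 : Int) ≤ (k : Int) + 1 := by omega
      have hr := PySem.List.pyRange_one_succ_right (a := 1) (b := (k : Int) + 1) hb
      push_cast
      rw [hr, List.foldl_append, List.map_append, ih]
      have hx : 0 ≤ c → 0 ≤ 50 + (k : Int) * c := by
        intro hc; have := mul_nonneg (Int.natCast_nonneg k) hc; omega
      simp only [List.foldl_cons, List.foldl_nil, List.map_cons, List.map_nil]
      rw [pv_clamp_step _ _ hx]; ring_nf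

-- ===== VERDICT (by name: the statement is the Claim_ definition above) =====
theorem simulate_pm25_spec : Claim_equal_simulate_pm25 := by
  intro w f t r n _
  unfold Spec_simulate_pm25 simulate_pm25 simulate_pm25_alt
  set c : Int :=
    (if w > 15 then (-10 : Int) else if w < 5 then 5 else 0)
    + f * 2
    + (if t == "high" then (7 : Int) else if t == "medium" then 4 else 1)
    + (if r then (-8 : Int) else 0) with hc
  have hstep :
      (fun (st : Int × List (Int × Int)) (day : Int) =>
        let pm25 := st.1
        let change : Int := 0
        let change := if w > 15 then change - 10
                      else if w < 5 then change + 5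
                      else change
        let change := change + f * 2
        let change := if t == "high" then change + 7
                      else if t == "medium" then change + 4
                      else change + 1
        let change := if r then change - 8 else change
        let pm25 := max 0 (pm25 + change)
        (pm25, st.2 ++ [(day, pm25)]))
      = (fun (st : Int × List (Int × Int)) (day : Int) =>
          (max 0 (st.1 + c), st.2 ++ [(day, max 0 (st.1 + c))])) := by
    funext st day
    simp only [hc]
    split_ifs <;> ring_nf
  simp only [hstep]
  by_cases hn : n ≤ 0
  · rw [PySem.List.pyRange_one_eq_nil (by omega : n + 1 ≤ 1)]
    simp
  · have hk : n = ((n.toNat : Int)) := by omega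
    rw [hk, pv_loop_closed c n.toNat]
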